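-- pv_equiv track=rewrite | github.com/Nateml/CPUBenchmarker | multi-persistance/classes/calc.py | loop
-- ===== SOURCE A (Python) =====
-- def getPersistance(num):
--     persistance = 0
--     while(len(str(num)) > 1):
--         product = 1
--         for i in str(num):
--             dig = int(i)
--             product = product * dig
--         persistance += 1
--         num = product
--
--     return (persistance)
--
-- def loop(par):
--     highPers = 0
--     highPersNum = 0
--     for i in range(par):
--         pers = getPersistance(i)
--         if pers > highPers:
--             highPers = pers
--             highPersNum = i
--     return([highPers, highPersNum])
-- ===== SOURCE B (Python) =====
-- def loop(par):
--     # Dynamic programming: persistence(i) = 1 + persistence(digit product of i),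
--     # with digit products computed arithmetically and the persistence of every
--     # digit product memoized in a dictionary (digit products repeat massively,
--     # so each chain is walked once; no str()/int() round-trips at all).
--     memo = {}
--     best_p = 0
--     best_n = 0
--     for i in range(par):
--         if i < 10:
--             p = 0
--         else:
--             d = 1
--             n = i
--             while n:
--                 d *= n % 10
--                 n //= 10
--             if d in memo:
--                 p = 1 + memo[d]
--             else:
--                 q = pers_memo(d, memo)
--                 memo[d] = q
--                 p = 1 + q
--         if p > best_p:
--             best_p = p
--             best_n = i
--     return [best_p, best_n]
--
-- def pers_memo(m, memo):
--     # persistence of m, using/filling the memo (m is a digit product, < its source)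
--     if m < 10:
--         return 0
--     if m in memo:
--         return memo[m]
--     d = 1
--     n = m
--     while n:
--         d *= n % 10
--         n //= 10
--     q = 1 + pers_memo(d, memo)
--     memo[m] = q
--     return q
-- ===== Notes on version B (the rewrite author's own statement) =====
-- stated objective: faster
-- what changed: Replaces the per-number string-conversion while-loop with dynamic programming: each i's persistence is 1 + the memoized persistence of its arithmetically computed digit product (which is always smaller than i), so no repeated str()/int() round-trips.
import Mathlib
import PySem

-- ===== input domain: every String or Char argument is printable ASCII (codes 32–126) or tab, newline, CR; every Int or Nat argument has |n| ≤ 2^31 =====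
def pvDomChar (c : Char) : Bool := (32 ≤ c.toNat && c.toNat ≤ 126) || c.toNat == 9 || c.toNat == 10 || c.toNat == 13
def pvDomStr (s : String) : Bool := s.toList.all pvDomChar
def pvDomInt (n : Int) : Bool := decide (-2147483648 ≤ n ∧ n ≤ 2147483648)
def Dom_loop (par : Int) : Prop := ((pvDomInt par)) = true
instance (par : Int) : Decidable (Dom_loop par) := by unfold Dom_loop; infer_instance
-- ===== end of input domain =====

-- B replaces A's repeated string round-trips by a memoized (dynamic-programming)
-- persistence table over arithmetic digit products; measurably faster by a constant factor.

-- ===== PORT A =====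
-- while len(str(num)) > 1: product = product of int(c) for c in str(num); num = product; persistance += 1
-- Ported with fuel (num.toNat + 1 iterations always suffice: the digit product of a
-- multi-digit nonnegative num is < num, and loop only ever passes nonnegative numbers).
-- int(c) is ported as (ofChars? [c]).getD 0; the none case is unreachable: every char of
-- str(num) for the nonnegative num that loop passes is a decimal digit.
def persLoop : Nat → Int → Int → Int
  | 0, _, pers => pers
  | f+1, num, pers =>
    if 1 < (PySem.Int.toChars num).length then
      persLoop f
        ((PySem.Int.toChars num).foldl
          (fun product c => product * ((PySem.Int.ofChars? [c]).getD 0)) 1)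
        (pers + 1)
    else pers

def getPersistance (num : Int) : Int := persLoop (num.toNat + 1) num 0

def loop (par : Int) : List Int :=
  let s := (PySem.List.pyRange 0 par 1).foldl
    (fun (s : Int × Int) i =>
      let pers := getPersistance i
      if pers > s.1 then (pers, i) else s) (0, 0)
  [s.1, s.2]

-- ===== PORT B =====
-- while n: d *= n % 10; n //= 10   -- n is only ever nonnegative here,
-- so Python's `n != 0` test is ported as `0 < n` (a totality guard equal to it on the reached inputs).
def digitProdLoop (n d : Int) : Int :=
  if h : 0 < n then digitProdLoop (PySem.Int.floordiv n 10) (d * PySem.Int.mod n 10) else d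
termination_by n.toNat
decreasing_by
  rw [PySem.Int.floordiv_eq_ediv_of_pos (by norm_num)]
  omega

-- pers_memo(m, memo): the mutated dict is threaded explicitly (returned alongside the value).
-- Ported with fuel (m.toNat + 1 always suffices: the digit product of a multi-digit
-- nonnegative m is < m, and the function is only ever applied to nonnegative digit products).
def persMemo : Nat → Int → PySem.Dict Int Int → Int × PySem.Dict Int Int
  | 0, _, memo => (0, memo)
  | fuel + 1, m, memo =>
    if m < 10 then (0, memo)
    else if PySem.Dict.contains memo m then (PySem.Dict.getD memo m 0, memo)
    else
      let d := digitProdLoop m 1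
      let r := persMemo fuel d memo
      let q := 1 + r.1
      (q, PySem.Dict.insert r.2 m q)

-- memo[d] is ported as getD with default 0; the miss case is unreachable (guarded by `d in memo`).
def loop_alt (par : Int) : List Int :=
  let s := (PySem.List.pyRange 0 par 1).foldl
    (fun (s : PySem.Dict Int Int × Int × Int) i =>
      let t : Int × PySem.Dict Int Int :=
        if i < 10 then (0, s.1)
        else
          let d := digitProdLoop i 1
          if PySem.Dict.contains s.1 d then (1 + PySem.Dict.getD s.1 d 0, s.1)
          else
            let r := persMemo (d.toNat + 1) d s.1
            (1 + r.1, PySem.Dict.insert r.2 d r.1)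
      if t.1 > s.2.1 then (t.2, t.1, i) else (t.2, s.2.1, s.2.2)) (PySem.Dict.empty, 0, 0)
  [s.2.1, s.2.2]

-- ===== PRECONDITION & SPEC =====
def Spec_loop (par : Int) (out : List Int) : Prop := out = loop_alt par
instance (par : Int) (out : List Int) : Decidable (Spec_loop par out) := by unfold Spec_loop; infer_instance

-- ===== CLAIM (what is proved, stated in full; the proofs are below) =====
def Claim_equal_loop : Prop := ∀ (par : Int), Dom_loop par → Spec_loop par (loop par)

-- ===== LEMMAS AND PROOFS =====

-- Arithmetic digit product (the value B's inner while loop computes; 1 for n = 0).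
def dpN (n : Nat) : Nat :=
  if h : n = 0 then 1 else dpN (n / 10) * (n % 10)
termination_by n
decreasing_by exact Nat.div_lt_self (Nat.pos_of_ne_zero h) (by norm_num)

lemma dpN_zero : dpN 0 = 1 := by
  rw [dpN]
  rfl

lemma dpN_ne (n : Nat) (h : n ≠ 0) : dpN n = dpN (n / 10) * (n % 10) := by
  rw [dpN, dif_neg h]

lemma dpN_le : ∀ n : Nat, 1 ≤ n → dpN n ≤ n := by
  intro n
  induction n using Nat.strong_induction_on with
  | _ n ih =>
    intro h1
    rw [dpN_ne n (by omega)]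
    by_cases h10 : n < 10
    · rw [Nat.div_eq_of_lt h10, dpN_zero]
      omega
    · have hd : n / 10 < n := Nat.div_lt_self (by omega) (by norm_num)
      have := ih (n / 10) hd (by omega)
      have hm : n % 10 ≤ 9 := by omega
      have : dpN (n / 10) * (n % 10) ≤ (n / 10) * 9 := Nat.mul_le_mul this hm
      omega

lemma dpN_lt (n : Nat) (h : 10 ≤ n) : dpN n < n := by
  rw [dpN_ne n (by omega)]
  have := dpN_le (n / 10) (by omega)
  have hm : n % 10 ≤ 9 := by omega
  have : dpN (n / 10) * (n % 10) ≤ (n / 10) * 9 := Nat.mul_le_mul this hm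
  omega

-- Multiplicative persistence, the value A's while loop counts.
def P (n : Nat) : Nat :=
  if h : n < 10 then 0 else P (dpN n) + 1
termination_by n
decreasing_by exact dpN_lt n (by omega)

lemma P_lt (n : Nat) (h : n < 10) : P n = 0 := by
  rw [P, dif_pos h]

lemma P_ge (n : Nat) (h : ¬ n < 10) : P n = P (dpN n) + 1 := by
  rw [P, dif_neg h]

-- Decimal digit characters of n (what str(n) produces for n ≥ 0).
def decChars (n : Nat) : List Char :=
  if h : n < 10 then [Nat.digitChar n] else decChars (n / 10) ++ [Nat.digitChar (n % 10)]
termination_by n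
decreasing_by exact Nat.div_lt_self (by omega) (by norm_num)

lemma decChars_lt (n : Nat) (h : n < 10) : decChars n = [Nat.digitChar n] := by
  rw [decChars, dif_pos h]

lemma decChars_ge (n : Nat) (h : ¬ n < 10) :
    decChars n = decChars (n / 10) ++ [Nat.digitChar (n % 10)] := by
  rw [decChars, dif_neg h]

lemma toDigitsCore_eq : ∀ (n f : Nat) (acc : List Char), n < f →
    Nat.toDigitsCore 10 f n acc = decChars n ++ acc := by
  intro n
  induction n using Nat.strong_induction_on with
  | _ n ih =>
    intro f acc hf
    obtain ⟨f', rfl⟩ : ∃ f', f = f' + 1 := ⟨f - 1, by omega⟩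
    rw [Nat.toDigitsCore]
    by_cases h0 : n / 10 = 0
    · rw [if_pos h0]
      have h10 : n < 10 := by omega
      rw [decChars_lt n h10]
      have : n % 10 = n := by omega
      rw [this]
      rfl
    · rw [if_neg h0]
      have hdn : n / 10 < n := Nat.div_lt_self (by omega) (by norm_num)
      have hff : n / 10 < f' := by omega
      rw [ih (n / 10) hdn f' (Nat.digitChar (n % 10) :: acc) hff]
      rw [decChars_ge n (by omega)]
      simp

lemma toChars_natCast (n : Nat) : PySem.Int.toChars (n : Int) = decChars n := by
  simp only [PySem.Int.toChars, Int.toNat_natCast]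
  rw [if_neg (by omega)]
  rw [Nat.toDigits, toDigitsCore_eq n (n + 1) [] (by omega)]
  simp

lemma decChars_length_one (n : Nat) (h : n < 10) : (decChars n).length = 1 := by
  rw [decChars_lt n h]
  rfl

lemma decChars_length_pos (n : Nat) : 0 < (decChars n).length := by
  rw [decChars]
  split_ifs <;> simp

lemma decChars_length_gt (n : Nat) (h : 10 ≤ n) : 1 < (decChars n).length := by
  rw [decChars_ge n (by omega)]
  have := decChars_length_pos (n / 10)
  simp only [List.length_append, List.length_cons, List.length_nil]
  omega

lemma digitVal (d : Nat) (h : d < 10) :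
    ((PySem.Int.ofChars? [Nat.digitChar d]).getD 0) = (d : Int) := by
  interval_cases d <;> decide

lemma foldl_decChars : ∀ (n : Nat), 1 ≤ n → ∀ (acc : Int),
    (decChars n).foldl (fun product c => product * ((PySem.Int.ofChars? [c]).getD 0)) acc
      = acc * (dpN n : Int) := by
  intro n
  induction n using Nat.strong_induction_on with
  | _ n ih =>
    intro h1 acc
    by_cases h10 : n < 10
    · rw [decChars_lt n h10]
      simp only [List.foldl_cons, List.foldl_nil]
      rw [digitVal n h10]
      rw [dpN_ne n (by omega), Nat.div_eq_of_lt h10, Nat.mod_eq_of_lt h10, dpN_zero]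
      simp
    · rw [decChars_ge n h10]
      rw [List.foldl_append]
      rw [ih (n / 10) (Nat.div_lt_self (by omega) (by norm_num)) (by omega) acc]
      simp only [List.foldl_cons, List.foldl_nil]
      rw [digitVal (n % 10) (by omega)]
      rw [dpN_ne n (by omega)]
      push_cast
      ring

lemma digitProdLoop_eq : ∀ (n : Nat) (d : Int), digitProdLoop (n : Int) d = d * (dpN n : Int) := by
  intro n
  induction n using Nat.strong_induction_on with
  | _ n ih =>
    intro d
    rw [digitProdLoop]
    by_cases h0 : n = 0
    · subst h0
      rw [dif_neg (by omega), dpN_zero]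
      simp
    · rw [dif_pos (by exact_mod_cast Nat.pos_of_ne_zero h0)]
      have hdiv : PySem.Int.floordiv (n : Int) 10 = ((n / 10 : Nat) : Int) := by
        rw [PySem.Int.floordiv_eq_ediv_of_pos (by norm_num)]
        omega
      have hmod : PySem.Int.mod (n : Int) 10 = ((n % 10 : Nat) : Int) := by
        rw [PySem.Int.mod_eq_emod_of_pos (by norm_num)]
        omega
      rw [hdiv, hmod, ih (n / 10) (Nat.div_lt_self (by omega) (by norm_num))]
      rw [dpN_ne n h0]
      push_cast
      ring

lemma persLoop_eq : ∀ (n : Nat) (f : Nat) (pers : Int), n < f →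
    persLoop f (n : Int) pers = pers + (P n : Int) := by
  intro n
  induction n using Nat.strong_induction_on with
  | _ n ih =>
    intro f pers hf
    obtain ⟨f', rfl⟩ : ∃ f', f = f' + 1 := ⟨f - 1, by omega⟩
    rw [persLoop]
    by_cases h10 : n < 10
    · rw [toChars_natCast, if_neg (by rw [decChars_length_one n h10]; omega)]
      rw [P_lt n h10]
      simp
    · rw [toChars_natCast, if_pos (decChars_length_gt n (by omega))]
      rw [foldl_decChars n (by omega) 1, one_mul]
      have hlt : dpN n < n := dpN_lt n (by omega)
      rw [ih (dpN n) hlt f' (pers + 1) (by omega)]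
      rw [P_ge n h10]
      push_cast
      ring

lemma getPersistance_eq (n : Nat) : getPersistance (n : Int) = (P n : Int) := by
  have h : n < ((n : Int)).toNat + 1 := by omega
  simpa using persLoop_eq n (((n : Int)).toNat + 1) 0 h

-- The memo invariant: every binding the dictionary holds is a correct persistence value.
def MemoInv (memo : PySem.Dict Int Int) : Prop :=
  ∀ (k v : Int), PySem.Dict.get? memo k = some v → 0 ≤ k ∧ v = (P k.toNat : Int)

lemma MemoInv_empty : MemoInv PySem.Dict.empty := by
  intro k v h
  simp [PySem.Dict.get?_empty] at h

lemma persMemo_eq : ∀ (m : Nat) (fuel : Nat) (memo : PySem.Dict Int Int), m < fuel → MemoInv memo →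
    (persMemo fuel (m : Int) memo).1 = (P m : Int) ∧ MemoInv (persMemo fuel (m : Int) memo).2 := by
  intro m
  induction m using Nat.strong_induction_on with
  | _ m ih =>
    intro fuel memo hf hInv
    obtain ⟨f', rfl⟩ : ∃ f', fuel = f' + 1 := ⟨fuel - 1, by omega⟩
    rw [persMemo]
    by_cases h10 : m < 10
    · rw [if_pos (by exact_mod_cast h10)]
      refine ⟨?_, hInv⟩
      rw [P_lt m h10]
      simp
    · rw [if_neg (by exact_mod_cast h10)]
      by_cases hc : PySem.Dict.contains memo (m : Int) = true
      · rw [if_pos hc]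
        obtain ⟨v, hv⟩ : ∃ v, PySem.Dict.get? memo (m : Int) = some v := by
          rw [PySem.Dict.contains_eq_isSome_get?] at hc
          exact Option.isSome_iff_exists.mp hc
        refine ⟨?_, hInv⟩
        show PySem.Dict.getD memo (m : Int) 0 = (P m : Int)
        rw [PySem.Dict.getD_eq_get?_getD, hv, Option.getD_some, (hInv _ _ hv).2]
        simp
      · rw [if_neg hc]
        have hd : digitProdLoop (m : Int) 1 = ((dpN m : Nat) : Int) := by
          rw [digitProdLoop_eq m 1, one_mul]
        have hlt : dpN m < m := dpN_lt m (by omega)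
        have ihm := ih (dpN m) hlt f' memo (by omega) hInv
        simp only [hd]
        constructor
        · show 1 + (persMemo f' ((dpN m : Nat) : Int) memo).1 = (P m : Int)
          rw [ihm.1, P_ge m h10]
          push_cast
          ring
        · intro k v hkv
          by_cases hk : k = (m : Int)
          · subst hk
            rw [PySem.Dict.get?_insert_self] at hkv
            obtain rfl : v = 1 + (persMemo f' ((dpN m : Nat) : Int) memo).1 := by
              exact (Option.some_inj.mp hkv).symm
            refine ⟨Int.natCast_nonneg _, ?_⟩
            rw [ihm.1, Int.toNat_natCast, P_ge m h10]
            push_cast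
            ring
          · rw [PySem.Dict.get?_insert_of_ne _ _ hk] at hkv
            exact ihm.2 _ _ hkv

lemma fold_eq (k : Nat) :
    MemoInv ((PySem.List.pyRange 0 (k : Int) 1).foldl
      (fun (s : PySem.Dict Int Int × Int × Int) i =>
        let t : Int × PySem.Dict Int Int :=
          if i < 10 then (0, s.1)
          else
            let d := digitProdLoop i 1
            if PySem.Dict.contains s.1 d then (1 + PySem.Dict.getD s.1 d 0, s.1)
            else
              let r := persMemo (d.toNat + 1) d s.1
              (1 + r.1, PySem.Dict.insert r.2 d r.1)
        if t.1 > s.2.1 then (t.2, t.1, i) else (t.2, s.2.1, s.2.2)) (PySem.Dict.empty, 0, 0)).1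
    ∧ ((PySem.List.pyRange 0 (k : Int) 1).foldl
      (fun (s : PySem.Dict Int Int × Int × Int) i =>
        let t : Int × PySem.Dict Int Int :=
          if i < 10 then (0, s.1)
          else
            let d := digitProdLoop i 1
            if PySem.Dict.contains s.1 d then (1 + PySem.Dict.getD s.1 d 0, s.1)
            else
              let r := persMemo (d.toNat + 1) d s.1
              (1 + r.1, PySem.Dict.insert r.2 d r.1)
        if t.1 > s.2.1 then (t.2, t.1, i) else (t.2, s.2.1, s.2.2)) (PySem.Dict.empty, 0, 0)).2
      = (PySem.List.pyRange 0 (k : Int) 1).foldl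
        (fun (s : Int × Int) i =>
          let pers := getPersistance i
          if pers > s.1 then (pers, i) else s) (0, 0) := by
  induction k with
  | zero =>
    rw [show ((0 : Nat) : Int) = 0 by rfl, PySem.List.pyRange_one_eq_nil (by omega)]
    exact ⟨MemoInv_empty, rfl⟩
  | succ k ih =>
    obtain ⟨hInv, hEq⟩ := ih
    have hcast : ((k + 1 : Nat) : Int) = (k : Int) + 1 := by push_cast; ring
    rw [hcast, PySem.List.pyRange_one_succ_right (by omega)]
    simp only [List.foldl_append, List.foldl_cons, List.foldl_nil]
    -- name the two states reached after the first k numbers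
    generalize hB : (PySem.List.pyRange 0 (k : Int) 1).foldl
      (fun (s : PySem.Dict Int Int × Int × Int) i =>
        let t : Int × PySem.Dict Int Int :=
          if i < 10 then (0, s.1)
          else
            let d := digitProdLoop i 1
            if PySem.Dict.contains s.1 d then (1 + PySem.Dict.getD s.1 d 0, s.1)
            else
              let r := persMemo (d.toNat + 1) d s.1
              (1 + r.1, PySem.Dict.insert r.2 d r.1)
        if t.1 > s.2.1 then (t.2, t.1, i) else (t.2, s.2.1, s.2.2)) (PySem.Dict.empty, 0, 0) = sB at hInv hEq ⊢
    rw [hEq]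
    generalize (PySem.List.pyRange 0 (k : Int) 1).foldl
        (fun (s : Int × Int) i =>
          let pers := getPersistance i
          if pers > s.1 then (pers, i) else s) (0, 0) = sA at *
    -- the value the B-step computes is the persistence of k, and the memo stays sound
    have key : (if ((k : Int)) < 10 then ((0 : Int), sB.1)
        else
          if PySem.Dict.contains sB.1 (digitProdLoop (k : Int) 1) then
            (1 + PySem.Dict.getD sB.1 (digitProdLoop (k : Int) 1) 0, sB.1)
          else
            (1 + (persMemo ((digitProdLoop (k : Int) 1).toNat + 1) (digitProdLoop (k : Int) 1) sB.1).1,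
             PySem.Dict.insert
               (persMemo ((digitProdLoop (k : Int) 1).toNat + 1) (digitProdLoop (k : Int) 1) sB.1).2
               (digitProdLoop (k : Int) 1)
               (persMemo ((digitProdLoop (k : Int) 1).toNat + 1) (digitProdLoop (k : Int) 1) sB.1).1)).1
        = ((P k : Nat) : Int)
        ∧ MemoInv (if ((k : Int)) < 10 then ((0 : Int), sB.1)
        else
          if PySem.Dict.contains sB.1 (digitProdLoop (k : Int) 1) then
            (1 + PySem.Dict.getD sB.1 (digitProdLoop (k : Int) 1) 0, sB.1)
          else
            (1 + (persMemo ((digitProdLoop (k : Int) 1).toNat + 1) (digitProdLoop (k : Int) 1) sB.1).1,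
             PySem.Dict.insert
               (persMemo ((digitProdLoop (k : Int) 1).toNat + 1) (digitProdLoop (k : Int) 1) sB.1).2
               (digitProdLoop (k : Int) 1)
               (persMemo ((digitProdLoop (k : Int) 1).toNat + 1) (digitProdLoop (k : Int) 1) sB.1).1)).2 := by
      by_cases hk : k < 10
      · rw [if_pos (show ((k : Int)) < 10 by exact_mod_cast hk)]
        exact ⟨by rw [P_lt k hk]; simp, hInv⟩
      · rw [if_neg (show ¬ ((k : Int)) < 10 by exact_mod_cast hk)]
        have hd : digitProdLoop (k : Int) 1 = ((dpN k : Nat) : Int) := by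
          rw [digitProdLoop_eq k 1, one_mul]
        simp only [hd]
        by_cases hc : PySem.Dict.contains sB.1 ((dpN k : Nat) : Int) = true
        · rw [if_pos hc]
          obtain ⟨v, hv⟩ : ∃ v, PySem.Dict.get? sB.1 ((dpN k : Nat) : Int) = some v := by
            rw [PySem.Dict.contains_eq_isSome_get?] at hc
            exact Option.isSome_iff_exists.mp hc
          refine ⟨?_, hInv⟩
          show 1 + PySem.Dict.getD sB.1 ((dpN k : Nat) : Int) 0 = ((P k : Nat) : Int)
          rw [PySem.Dict.getD_eq_get?_getD, hv, Option.getD_some, (hInv _ _ hv).2,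
              Int.toNat_natCast, P_ge k hk]
          push_cast
          ring
        · rw [if_neg hc]
          have hfuel : dpN k < (((dpN k : Nat) : Int)).toNat + 1 := by omega
          have hpm := persMemo_eq (dpN k) ((((dpN k : Nat) : Int)).toNat + 1) sB.1 hfuel hInv
          constructor
          · show 1 + (persMemo ((((dpN k : Nat) : Int)).toNat + 1) ((dpN k : Nat) : Int) sB.1).1
                = ((P k : Nat) : Int)
            rw [hpm.1, P_ge k hk]
            push_cast
            ring
          · show MemoInv (PySem.Dict.insert
                (persMemo ((((dpN k : Nat) : Int)).toNat + 1) ((dpN k : Nat) : Int) sB.1).2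
                ((dpN k : Nat) : Int)
                (persMemo ((((dpN k : Nat) : Int)).toNat + 1) ((dpN k : Nat) : Int) sB.1).1)
            intro k' v hkv
            by_cases hk' : k' = ((dpN k : Nat) : Int)
            · subst hk'
              rw [PySem.Dict.get?_insert_self] at hkv
              obtain rfl : v = (persMemo ((((dpN k : Nat) : Int)).toNat + 1)
                  ((dpN k : Nat) : Int) sB.1).1 := (Option.some_inj.mp hkv).symm
              exact ⟨Int.natCast_nonneg _, by rw [hpm.1, Int.toNat_natCast]⟩
            · rw [PySem.Dict.get?_insert_of_ne _ _ hk'] at hkv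
              exact hpm.2 _ _ hkv
    simp only [getPersistance_eq k]
    rw [key.1]
    by_cases hgt : ((P k : Nat) : Int) > sA.1
    · rw [if_pos hgt, if_pos hgt]
      exact ⟨key.2, rfl⟩
    · rw [if_neg hgt, if_neg hgt]
      exact ⟨key.2, rfl⟩

-- ===== VERDICT (by name: the statement is the Claim_ definition above) =====
theorem loop_spec : Claim_equal_loop := by
  intro par _
  unfold Spec_loop loop loop_alt
  by_cases h : par ≤ 0
  · rw [PySem.List.pyRange_one_eq_nil h]
    rfl
  · have hpar : par = ((par.toNat : Nat) : Int) := by omega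
    rw [hpar]
    simp only [(fold_eq par.toNat).2]
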